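-- pv_equiv track=rewrite | github.com/IsaacG/Advent-of-Code | advent_of_code/2021/d25.py | input_parser
-- ===== SOURCE A (Python) =====
-- InputType = tuple[set[tuple[int, int]], set[tuple[int, int]], int, int]
--
-- def input_parser(data: str) -> InputType:
--     """Parse the input data."""
--     lines = data.splitlines()
--     right = {
--         (x, y)
--         for y, line in enumerate(lines)
--         for x, val in enumerate(line)
--         if val == ">"
--     }
--     down = {
--         (x, y)
--         for y, line in enumerate(lines)
--         for x, val in enumerate(line)
--         if val == "v"
--     }
--     width = len(lines[0])
--     height = len(lines)
--     return right, down, width, height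
-- ===== SOURCE B (Python) =====
-- def input_parser(data: str):
--     """Parse the input data."""
--     lines = data.splitlines()
--     right = set()
--     down = set()
--     for y, line in enumerate(lines):
--         x = line.find(">")
--         while x != -1:
--             right.add((x, y))
--             x = line.find(">", x + 1)
--         x = line.find("v")
--         while x != -1:
--             down.add((x, y))
--             x = line.find("v", x + 1)
--     return right, down, len(lines[0]), len(lines)
-- ===== Notes on version B (the rewrite author's own statement) =====
-- stated objective: faster
-- what changed: B does not test every grid cell: per line it jumps from occurrence to occurrence of '>' and of 'v' with str.find(ch, x+1) while-loops, instead of A's two whole-grid set comprehensions that inspect each character.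
import Mathlib
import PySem

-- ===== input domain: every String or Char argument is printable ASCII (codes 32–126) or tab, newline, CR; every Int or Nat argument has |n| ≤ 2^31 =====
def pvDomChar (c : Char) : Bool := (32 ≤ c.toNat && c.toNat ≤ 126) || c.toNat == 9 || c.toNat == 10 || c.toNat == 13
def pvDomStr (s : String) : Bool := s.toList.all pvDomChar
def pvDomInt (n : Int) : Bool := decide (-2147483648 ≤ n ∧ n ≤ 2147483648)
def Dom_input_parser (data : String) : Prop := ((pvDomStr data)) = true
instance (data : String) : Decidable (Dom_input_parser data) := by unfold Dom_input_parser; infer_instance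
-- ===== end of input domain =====

-- B replaces A's two whole-grid comprehension sweeps by per-line str.find jump loops that
-- only visit the cucumbers themselves (faster by a constant factor).

-- ===== PORT A =====
-- two comprehension sweeps: one building `right`, one building `down`
def input_parser (data : String) : (List (Int × Int)) × (List (Int × Int)) × Int × Int :=
  let lines := PySem.Str.splitlines data
  let right : PySem.Set (Int × Int) :=
    (PySem.List.enumerate lines).foldl (fun s yl =>
      (PySem.List.enumerate yl.2.toList).foldl (fun s xv =>
        if xv.2 = '>' then PySem.Set.add s (xv.1, yl.1) else s) s) PySem.Set.empty
  let down : PySem.Set (Int × Int) :=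
    (PySem.List.enumerate lines).foldl (fun s yl =>
      (PySem.List.enumerate yl.2.toList).foldl (fun s xv =>
        if xv.2 = 'v' then PySem.Set.add s (xv.1, yl.1) else s) s) PySem.Set.empty
  let width : Int := PySem.Str.len (((PySem.List.pyGet? lines 0).getD ""))  -- lines[0]: IndexError (excluded by Pre_) when lines = []
  let height : Int := (lines.length : Int)
  (right, down, width, height)

-- ===== PORT B =====
-- `x = line.find(ch); while x != -1: acc.add((x, y)); x = line.find(ch, x + 1)`
-- fuel = len(line)+1 only makes the while-loop total; it never runs out (each find moves right).
def pvFindAll (line : String) (ch : String) (y : Int) :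
    PySem.Set (Int × Int) → Int → Nat → PySem.Set (Int × Int)
  | s, _, 0 => s
  | s, x, fuel + 1 =>
      if x = -1 then s
      else pvFindAll line ch y (PySem.Set.add s (x, y)) (PySem.Str.findFrom line ch (x + 1)) fuel

def input_parser_alt (data : String) : (List (Int × Int)) × (List (Int × Int)) × Int × Int :=
  let lines := PySem.Str.splitlines data
  let rd : PySem.Set (Int × Int) × PySem.Set (Int × Int) :=
    (PySem.List.enumerate lines).foldl (fun rd yl =>
      let fuel := (PySem.Str.len yl.2).toNat + 1
      let r := pvFindAll yl.2 ">" yl.1 rd.1 (PySem.Str.find yl.2 ">") fuel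
      let d := pvFindAll yl.2 "v" yl.1 rd.2 (PySem.Str.find yl.2 "v") fuel
      (r, d)) (PySem.Set.empty, PySem.Set.empty)
  let width : Int := PySem.Str.len (((PySem.List.pyGet? lines 0).getD ""))  -- lines[0]: same IndexError as A
  let height : Int := (lines.length : Int)
  (rd.1, rd.2, width, height)

-- ===== PRECONDITION & SPEC =====
-- Pre_ excludes exactly the inputs (data = "") where `lines[0]` raises IndexError in both A and B.
def Pre_input_parser (data : String) : Prop := PySem.Str.splitlines data ≠ []
instance (data : String) : Decidable (Pre_input_parser data) := by unfold Pre_input_parser; infer_instance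
def pvWitness_input_parser : String := "v>\n>.v"

def Spec_input_parser (data : String) (out : (List (Int × Int)) × (List (Int × Int)) × Int × Int) : Prop := out = input_parser_alt data
instance (data : String) (out : (List (Int × Int)) × (List (Int × Int)) × Int × Int) : Decidable (Spec_input_parser data out) := by unfold Spec_input_parser; infer_instance

-- ===== CLAIM (what is proved, stated in full; the proofs are below) =====
def Claim_equal_input_parser : Prop := ∀ (data : String), Dom_input_parser data → Pre_input_parser data → Spec_input_parser data (input_parser data)

-- ===== LEMMAS AND PROOFS =====

-- a singleton list is a prefix iff it is the head
theorem singleton_prefix_iff {c : Char} {l : List Char} : [c] <+: l ↔ l.head? = some c := by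
  cases l with
  | nil => simp
  | cons a t => simp [List.cons_prefix_iff, eq_comm]

theorem singleton_infix_iff {c : Char} {l : List Char} : [c] <:+: l ↔ c ∈ l := by
  constructor
  · rintro ⟨s, t, rfl⟩; simp
  · intro h
    obtain ⟨s, t, rfl⟩ := List.append_of_mem h
    exact ⟨s, t, by simp⟩

-- folding the step function over a line with no occurrence of c leaves the set unchanged
theorem foldl_no_occ (c : Char) (y : Int) :
    ∀ (l : List Char) (k : Int) (s : PySem.Set (Int × Int)), (∀ ch ∈ l, ch ≠ c) →
    (PySem.List.enumerate l k).foldl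
      (fun s xv => if xv.2 = c then PySem.Set.add s (xv.1, y) else s) s = s := by
  intro l
  induction l with
  | nil => intro k s _; simp [PySem.List.enumerate_nil]
  | cons a t ih =>
    intro k s h
    have ha : a ≠ c := h a (by simp)
    simp only [PySem.List.enumerate_cons, List.foldl_cons]
    rw [if_neg ha]
    exact ih (k + 1) s (fun ch hch => h ch (by simp [hch]))

-- the find jump loop computes exactly the left-to-right filtered fold over the tail from k
theorem pvFindAll_eq (line : String) (cs : String) (c : Char) (y : Int) (hc : cs.toList = [c]) :
    ∀ (fuel : Nat) (k : Nat) (s : PySem.Set (Int × Int)),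
    k ≤ line.toList.length → line.toList.length - k < fuel →
    pvFindAll line cs y s (PySem.Chars.findFrom line.toList cs.toList k) fuel
    = (PySem.List.enumerate (line.toList.drop k) k).foldl
        (fun s xv => if xv.2 = c then PySem.Set.add s (xv.1, y) else s) s := by
  intro fuel
  induction fuel with
  | zero => intro k s hk hf; omega
  | succ f ih =>
    intro k s hk hf
    rw [hc]
    set l := line.toList with hl
    by_cases hneg : PySem.Chars.findFrom l [c] k = -1
    · -- no further occurrence
      rw [hneg]
      simp only [pvFindAll, reduceIte]
      have hno : ¬ ([c] <:+: l.drop k) :=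
        (PySem.Chars.findFrom_natCast_eq_neg_one_iff l [c] k hk).mp hneg
      rw [foldl_no_occ c y _ _ _ (fun ch hch hchc => hno (singleton_infix_iff.mpr (hchc ▸ hch)))]
    · -- found at k + j
      have hFF := PySem.Chars.findFrom_natCast l [c] k hk
      set r := PySem.Chars.find (l.drop k) [c] with hr
      have hrne : r ≠ -1 := by intro h0; rw [hFF, if_pos h0] at hneg; exact hneg rfl
      have hr0 : 0 ≤ r := by have := PySem.Chars.neg_one_le_find (l.drop k) [c]; omega
      have hEq : PySem.Chars.findFrom l [c] k = (k : Int) + r := by rw [hFF, if_neg hrne]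
      obtain ⟨hpre, hmin⟩ := PySem.Chars.find_spec (s := l.drop k) (sub := [c]) hr0
      set j := r.toNat with hj
      have hhead : ((l.drop k).drop j).head? = some c := singleton_prefix_iff.mp hpre
      rw [List.drop_drop, List.head?_drop] at hhead
      have hkj : k + j < l.length := by
        by_contra hge
        rw [List.getElem?_eq_none (by omega)] at hhead
        simp at hhead
      have hcc : l[k + j]'hkj = c := by
        rw [List.getElem?_eq_getElem hkj] at hhead
        exact Option.some.inj hhead
      have hmin' : ∀ i : Nat, i < j → ∀ (h : k + i < l.length), l[k + i]'h ≠ c := by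
        intro i hij h hic
        apply hmin i (by omega)
        rw [singleton_prefix_iff, List.drop_drop, List.head?_drop, List.getElem?_eq_getElem h, hic]
      -- unfold one step of the loop
      rw [hEq]
      have hx : (k : Int) + r ≠ -1 := by omega
      simp only [pvFindAll, if_neg hx]
      have hrj : (r : Int) = (j : Int) := by omega
      have hstep : PySem.Str.findFrom line cs ((k : Int) + r + 1) =
          PySem.Chars.findFrom l cs.toList ((k + j + 1 : Nat)) := by
        simp only [PySem.Str.findFrom_eq, ← hl]
        congr 1
        push_cast
        omega
      rw [hstep, ih (k + j + 1) _ (by omega) (by omega)]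
      have hcast : ((k + j + 1 : Nat) : Int) = (k : Int) + (j : Int) + 1 := by push_cast; ring
      rw [hcast, hrj]
      -- now decompose the right-hand fold
      have hsplit : l.drop k = (l.drop k).take j ++ (l[k + j]'hkj :: l.drop (k + j + 1)) := by
        conv_lhs => rw [← List.take_append_drop j (l.drop k)]
        rw [List.drop_drop, List.drop_eq_getElem_cons (by omega : k + j < l.length)]
      have hlen : ((l.drop k).take j).length = j := by
        simp [List.length_take, List.length_drop]; omega
      rw [hsplit, PySem.List.enumerate_append, List.foldl_append, hlen]
      have hseg : List.foldl (fun s xv => if xv.2 = c then PySem.Set.add s (xv.1, y) else s) s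
          (PySem.List.enumerate ((l.drop k).take j) k) = s := by
        apply foldl_no_occ
        intro ch hch hchc
        obtain ⟨i, hi, hgi⟩ := List.mem_iff_getElem.mp hch
        have hij : i < j := by rw [hlen] at hi; exact hi
        rw [List.getElem_take, List.getElem_drop] at hgi
        exact hmin' i hij (by omega) (hgi.trans hchc)
      rw [hseg, PySem.List.enumerate_cons, List.foldl_cons, hcc, if_pos rfl]

-- per line: B's two jump loops equal A's inner enumerate-fold for the same character
theorem line_eq (line : String) (cs : String) (c : Char) (y : Int) (hc : cs.toList = [c])
    (s : PySem.Set (Int × Int)) :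
    pvFindAll line cs y s (PySem.Str.find line cs) ((PySem.Str.len line).toNat + 1)
    = (PySem.List.enumerate line.toList).foldl
        (fun s xv => if xv.2 = c then PySem.Set.add s (xv.1, y) else s) s := by
  have h := pvFindAll_eq line cs c y hc (line.toList.length + 1) 0 s (by omega) (by omega)
  simpa [PySem.Chars.findFrom_zero, PySem.Str.find, PySem.Chars.len_eq] using h

-- the pair-state fold over lines factors into A's two separate folds
theorem outer_factor {σ : Type} (F G : (Int × String) → σ → σ) (L : List (Int × String)) :
    ∀ (r d : σ),
    L.foldl (fun rd yl => (F yl rd.1, G yl rd.2)) (r, d)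
    = (L.foldl (fun s yl => F yl s) r, L.foldl (fun s yl => G yl s) d) := by
  induction L with
  | nil => intro r d; rfl
  | cons p t ih => intro r d; simp only [List.foldl_cons]; exact ih _ _

-- ===== VERDICT (by name: the statement is the Claim_ definition above) =====
theorem input_parser_spec : Claim_equal_input_parser := by
  intro data _ _
  unfold Spec_input_parser input_parser input_parser_alt
  have hr : ∀ (yl : Int × String) (s : PySem.Set (Int × Int)),
      pvFindAll yl.2 ">" yl.1 s (PySem.Str.find yl.2 ">") ((PySem.Str.len yl.2).toNat + 1)
      = (PySem.List.enumerate yl.2.toList).foldl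
          (fun s xv => if xv.2 = '>' then PySem.Set.add s (xv.1, yl.1) else s) s :=
    fun yl s => line_eq yl.2 ">" '>' yl.1 rfl s
  have hd : ∀ (yl : Int × String) (s : PySem.Set (Int × Int)),
      pvFindAll yl.2 "v" yl.1 s (PySem.Str.find yl.2 "v") ((PySem.Str.len yl.2).toNat + 1)
      = (PySem.List.enumerate yl.2.toList).foldl
          (fun s xv => if xv.2 = 'v' then PySem.Set.add s (xv.1, yl.1) else s) s :=
    fun yl s => line_eq yl.2 "v" 'v' yl.1 rfl s
  simp only [hr, hd]
  rw [outer_factor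
    (fun yl s => List.foldl (fun s xv => if xv.2 = '>' then PySem.Set.add s (xv.1, yl.1) else s) s (PySem.List.enumerate yl.2.toList))
    (fun yl s => List.foldl (fun s xv => if xv.2 = 'v' then PySem.Set.add s (xv.1, yl.1) else s) s (PySem.List.enumerate yl.2.toList))]
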